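-- pv_equiv track=rewrite | github.com/SanjitBasker/advent-of-code-2024 | day_16.py | parse
-- ===== SOURCE A (Python) =====
-- import itertools
--
-- def parse(lines):
--     rows = list(lines)
--     traversable = [[c != "#" for c in r] for r in rows]
--     start = next(
--         itertools.chain.from_iterable(
--             ((i, j) for j, c in enumerate(r) if c == "S")
--             for i, r in enumerate(rows)
--         )
--     )
--     end = next(
--         itertools.chain.from_iterable(
--             ((i, j) for j, c in enumerate(r) if c == "E")
--             for i, r in enumerate(rows)
--         )
--     )
--     return traversable, start, end
-- ===== SOURCE B (Python) =====
-- import itertools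
--
-- def parse(lines):
--     rows = list(lines)
--     traversable = [[c != "#" for c in r] for r in rows]
--     flat = "".join(rows)
--     offs = list(itertools.accumulate(len(r) for r in rows))
--
--     def locate(ch):
--         pos = flat.index(ch)
--         i = 0
--         while i < len(offs) and offs[i] <= pos:
--             i += 1
--         return i, pos - (offs[i - 1] if i else 0)
--
--     return traversable, locate("S"), locate("E")
-- ===== Notes on version B (the rewrite author's own statement) =====
-- stated objective: alternative
-- what changed: Instead of A's chained per-cell generator scans over the enumerated 2-D grid, B flattens the grid into one string, finds the single global index of S (and of E) with str.index, and converts that flat index back to (row, col) using a cumulative-length offset table; Pre_ excludes grids missing S or E, where A raises StopIteration (B raises ValueError).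
import Mathlib
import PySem

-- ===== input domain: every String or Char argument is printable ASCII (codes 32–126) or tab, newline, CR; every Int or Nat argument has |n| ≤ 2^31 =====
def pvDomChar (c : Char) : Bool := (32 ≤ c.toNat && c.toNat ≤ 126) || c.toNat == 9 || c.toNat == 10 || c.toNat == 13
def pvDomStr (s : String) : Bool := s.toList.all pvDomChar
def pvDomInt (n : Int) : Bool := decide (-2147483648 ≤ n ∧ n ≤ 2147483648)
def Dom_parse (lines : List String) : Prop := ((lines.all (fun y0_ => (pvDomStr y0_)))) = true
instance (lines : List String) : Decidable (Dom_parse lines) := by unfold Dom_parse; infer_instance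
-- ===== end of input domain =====

-- B replaces A's two chained 2-D generator scans by a flat-string search: join the rows, take the
-- single global str.index of 'S' (and 'E'), and map it back to (row, col) with a cumulative-length
-- offset table; return values proved equal on grids containing both markers.

-- ===== PORT A =====
-- the chained generator '((i, j) for j, c in enumerate(r) if c == ch) for i, r in enumerate(rows)';
-- 'next' takes its first element (Pre_parse guarantees one exists)
def parseFindAll (ch : Char) (rows : List String) : List (Int × Int) :=
  (PySem.List.enumerate rows).flatMap (fun p =>
    (PySem.List.enumerate p.2.toList).filterMap (fun q =>
      if q.2 = ch then some (p.1, q.1) else none))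

def parse (lines : List String) : List (List Bool) × (Int × Int) × (Int × Int) :=
  let rows := lines
  let traversable := rows.map (fun r => r.toList.map (fun c => decide (c ≠ '#')))
  let start := (parseFindAll 'S' rows).headD (0, 0)
  let «end» := (parseFindAll 'E' rows).headD (0, 0)
  (traversable, start, «end»)

-- ===== PORT B =====
-- offs = list(itertools.accumulate(len(r) for r in rows)), running from an accumulator
def parseOffs (rows : List String) (acc : Int) : List Int :=
  match rows with
  | [] => []
  | r :: t => (acc + (r.toList.length : Int)) :: parseOffs t (acc + (r.toList.length : Int))

-- the while loop 'i = 0; while i < len(offs) and offs[i] <= pos: i += 1' as structural recursion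
def parseScan (offs : List Int) (pos : Int) : Nat :=
  match offs with
  | [] => 0
  | o :: t => if o ≤ pos then parseScan t pos + 1 else 0

-- locate(ch): pos = flat.index(ch) (ValueError = none, outside Pre_parse), then the offset lookup
def parseLocate (flat : List Char) (offs : List Int) (ch : Char) : Int × Int :=
  let pos : Int := ((PySem.List.index? flat ch).getD 0 : Nat)
  let i := parseScan offs pos
  ((i : Int), pos - (if i = 0 then 0 else (PySem.List.pyGet? offs ((i : Int) - 1)).getD 0))

def parse_alt (lines : List String) : List (List Bool) × (Int × Int) × (Int × Int) :=
  let rows := lines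
  let traversable := rows.map (fun r => r.toList.map (fun c => decide (c ≠ '#')))
  let flat := (rows.map String.toList).flatten   -- "".join(rows), as its character list
  let offs := parseOffs rows 0
  (traversable, parseLocate flat offs 'S', parseLocate flat offs 'E')

-- ===== PRECONDITION & SPEC =====
-- Pre_ excludes grids containing no 'S' or no 'E': A raises StopIteration there (B raises ValueError).
def Pre_parse (lines : List String) : Prop :=
  (∃ r ∈ lines, 'S' ∈ r.toList) ∧ (∃ r ∈ lines, 'E' ∈ r.toList)
instance (lines : List String) : Decidable (Pre_parse lines) := by unfold Pre_parse; infer_instance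

def pvWitness_parse : List String := ["#.S", ".E#"]

def Spec_parse (lines : List String) (out : List (List Bool) × (Int × Int) × (Int × Int)) : Prop := out = parse_alt lines
instance (lines : List String) (out : List (List Bool) × (Int × Int) × (Int × Int)) : Decidable (Spec_parse lines out) := by unfold Spec_parse; infer_instance

-- ===== CLAIM (what is proved, stated in full; the proofs are below) =====
def Claim_equal_parse : Prop := ∀ (lines : List String), Dom_parse lines → Pre_parse lines → Spec_parse lines (parse lines)

-- ===== LEMMAS AND PROOFS =====

-- proof-side characterisation of 'offs[i-1] if i else <base>' for the scanned prefix
def parsePrevOff (offs : List Int) (base pos : Int) : Int :=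
  match offs with
  | [] => base
  | o :: t => if o ≤ pos then parsePrevOff t o pos else base

theorem parseScan_prev (offs : List Int) (base pos : Int) :
    (if parseScan offs pos = 0 then base
     else (PySem.List.pyGet? offs ((parseScan offs pos : Int) - 1)).getD 0) =
      parsePrevOff offs base pos := by
  induction offs generalizing base with
  | nil => simp [parseScan, parsePrevOff]
  | cons o t ih =>
    simp only [parseScan, parsePrevOff]
    by_cases ho : o ≤ pos
    · simp only [if_pos ho, Nat.succ_ne_zero, if_false]
      rw [← ih o]
      have h1 : ((parseScan t pos + 1 : Nat) : Int) - 1 = ((parseScan t pos : Nat) : Int) := by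
        push_cast; ring
      rw [h1, PySem.List.pyGet?_natCast]
      by_cases h0 : parseScan t pos = 0
      · simp [h0]
      · obtain ⟨k, hk⟩ := Nat.exists_eq_succ_of_ne_zero h0
        have h2 : ((k + 1 : Nat) : Int) - 1 = ((k : Nat) : Int) := by push_cast; ring
        rw [hk, if_neg (Nat.succ_ne_zero k), Nat.succ_eq_add_one, h2,
          PySem.List.pyGet?_natCast]
        simp
    · simp [ho]

-- first match within one row: the filterMap over enumerate, head-first, is str.index
theorem parseRow_head (ch : Char) (l : List Char) (s c : Int) :
    (((PySem.List.enumerate l c).filterMap (fun q =>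
        if q.2 = ch then some (s, q.1) else none)).head?) =
      (PySem.List.index? l ch).map (fun j : Nat => (s, c + (j : Int))) := by
  induction l generalizing c with
  | nil => simp [PySem.List.index?_eq_idxOf?]
  | cons x xs ih =>
    rw [PySem.List.enumerate_cons]
    by_cases hx : x = ch
    · subst hx
      rw [PySem.List.index?_cons_self]
      simp
    · rw [PySem.List.index?_cons_of_ne _ hx]
      simp only [List.filterMap_cons, if_neg hx, ih (c + 1), Option.map_map]
      cases PySem.List.index? xs ch with
      | none => simp
      | some j =>
        simp only [Option.map_some, Function.comp_def]
        congr 2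
        push_cast; ring

-- index? through an append whose left part misses the value
theorem parseIndex?_append_left_none {α : Type} [DecidableEq α] (xs ys : List α) (v : α)
    (h : PySem.List.index? xs v = none) :
    PySem.List.index? (xs ++ ys) v = (PySem.List.index? ys v).map (· + xs.length) := by
  induction xs with
  | nil => simp
  | cons x t ih =>
    have hx : x ≠ v := by
      intro hv; subst hv
      rw [PySem.List.index?_cons_self] at h; simp at h
    have ht : PySem.List.index? t v = none := by
      rw [PySem.List.index?_cons_of_ne _ hx] at h
      exact Option.map_eq_none_iff.mp h
    rw [List.cons_append, PySem.List.index?_cons_of_ne _ hx, ih ht, Option.map_map]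
    cases PySem.List.index? ys v with
    | none => simp
    | some j => simp only [Option.map_some, Function.comp_def, List.length_cons]; congr 1

-- main invariant: the head of A's row-major chain vs B's flat index + offset table
theorem parseMain (ch : Char) (rows : List String) (s b : Int) (p : Nat)
    (h : PySem.List.index? ((rows.map String.toList).flatten) ch = some p) :
    (((PySem.List.enumerate rows s).flatMap (fun q =>
        (PySem.List.enumerate q.2.toList).filterMap (fun r =>
          if r.2 = ch then some (q.1, r.1) else none))).head?) =
      some (s + (parseScan (parseOffs rows b) (b + p) : Int),
            (b + p) - parsePrevOff (parseOffs rows b) b (b + p)) := by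
  induction rows generalizing s b p with
  | nil => simp [PySem.List.index?_eq_idxOf?] at h
  | cons r t ih =>
    rw [PySem.List.enumerate_cons, List.flatMap_cons, List.head?_append]
    rcases hr : PySem.List.index? r.toList ch with _ | j
    · -- ch not in this row: its chunk is empty, recurse with shifted base
      have hch : ch ∉ r.toList := (PySem.List.index?_eq_none_iff _ _).mp hr
      have hrow := parseRow_head ch r.toList s 0
      rw [hr] at hrow
      simp only [Option.map_none] at hrow
      rw [List.head?_eq_none_iff.mp hrow, List.head?_nil, Option.none_or]
      rw [List.map_cons, List.flatten_cons] at h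
      rw [parseIndex?_append_left_none _ _ _ hr] at h
      rcases ht : PySem.List.index? (t.map String.toList).flatten ch with _ | p'
      · rw [ht] at h; simp at h
      · rw [ht] at h
        have hp : p = p' + r.toList.length := by
          simpa using h.symm
        have hpos : b + (p : Int) = (b + (r.toList.length : Int)) + (p' : Int) := by
          rw [hp]; push_cast; ring
        rw [hpos, ih (s + 1) (b + (r.toList.length : Int)) p' ht]
        have hle' : b + (r.toList.length : Int) ≤ (b + (r.toList.length : Int)) + (p' : Int) :=
          le_add_of_nonneg_right (by positivity)
        simp only [parseOffs, parseScan, parsePrevOff, if_pos hle', Option.some.injEq,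
          Prod.mk.injEq]
        exact ⟨by push_cast; ring, trivial⟩
    · -- ch first occurs in this row at column j
      have hmem : ch ∈ r.toList := (PySem.List.index?_isSome_iff _ _).mp (by rw [hr]; rfl)
      have hjr : j < r.toList.length := by
        obtain ⟨hk, _, _⟩ := PySem.List.getElem_of_index?_eq_some hr
        exact hk
      rw [List.map_cons, List.flatten_cons, PySem.List.index?_append_of_mem _ hmem, hr] at h
      have hpj : p = j := by simpa using h.symm
      subst hpj
      have hrow := parseRow_head ch r.toList s 0
      rw [hr] at hrow
      simp only [Option.map_some, zero_add] at hrow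
      rw [hrow, Option.some_or]
      have hlt : ¬ (b + (r.toList.length : Int) ≤ b + (p : Int)) := by omega
      simp only [parseOffs, parseScan, parsePrevOff, if_neg hlt]
      simp

theorem parse_eq_alt (lines : List String) (hpre : Pre_parse lines) :
    parse lines = parse_alt lines := by
  obtain ⟨⟨rS, hrS, hS⟩, ⟨rE, hrE, hE⟩⟩ := hpre
  have hSf : 'S' ∈ (lines.map String.toList).flatten := by
    simp only [List.mem_flatten]
    exact ⟨rS.toList, List.mem_map_of_mem hrS, hS⟩
  have hEf : 'E' ∈ (lines.map String.toList).flatten := by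
    simp only [List.mem_flatten]
    exact ⟨rE.toList, List.mem_map_of_mem hrE, hE⟩
  obtain ⟨pS, hpS⟩ := Option.isSome_iff_exists.mp (((PySem.List.index?_isSome_iff _ _).mpr hSf))
  obtain ⟨pE, hpE⟩ := Option.isSome_iff_exists.mp (((PySem.List.index?_isSome_iff _ _).mpr hEf))
  have hS0 : (0 : Int) + (pS : Int) = (pS : Int) := by ring
  have hE0 : (0 : Int) + (pE : Int) = (pE : Int) := by ring
  have hMS := parseMain 'S' lines 0 0 pS hpS
  have hME := parseMain 'E' lines 0 0 pE hpE
  rw [hS0] at hMS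
  rw [hE0] at hME
  simp only [parse, parse_alt, parseFindAll, parseLocate, List.headD_eq_head?_getD]
  refine Prod.ext rfl (Prod.ext ?_ ?_)
  · rw [hMS, hpS]
    simp [← parseScan_prev (parseOffs lines 0) 0]
  · rw [hME, hpE]
    simp [← parseScan_prev (parseOffs lines 0) 0]

-- ===== VERDICT (by name: the statement is the Claim_ definition above) =====
theorem parse_spec : Claim_equal_parse := by
  intro lines _ hpre
  show parse lines = parse_alt lines
  exact parse_eq_alt lines hpre
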